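-- pv_equiv track=rewrite | github.com/sparkyb/adventofcode | 2021/day17.py | find_max_y_v0
-- ===== SOURCE A (Python) =====
-- import math
--
-- def calc_x(v0, t):
--   t = min(t, v0)
--   return v0 * t - t * (t - 1) // 2
--
-- def calc_y(v0, t):
--   return v0 * t - t * (t - 1) // 2
--
-- def find_t(y_v0, target_y):
--   if y_v0 > 0:
--     t = 2 * y_v0 + 2
--   else:
--     t = 1
--   while calc_y(y_v0, t) > target_y[1]:
--     t += 1
--   while calc_y(y_v0, t) >= target_y[0]:
--     yield t
--     t += 1
--
-- def find_x_v0(target_x, t):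
--   x_v0 = math.ceil(target_x[0] / t)
--   while calc_x(x_v0, t) < target_x[0]:
--     x_v0 += 1
--   while calc_x(x_v0, t) <= target_x[1]:
--     yield x_v0
--     x_v0 += 1
--
-- def hits_x(target_x, t):
--   for x_v0 in find_x_v0(target_x, t):
--     return x_v0
--   return None
--
-- def find_max_y_v0(target_x, target_y):
--   min_y_v0 = target_y[0]
--   max_y_v0 = -target_y[0] - 1
--   for y_v0 in range(max_y_v0, min_y_v0 - 1, -1):
--     for t in find_t(y_v0, target_y):
--       if hits_x(target_x, t):
--         return y_v0
--   raise AssertionError('Unreachable')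
-- ===== SOURCE B (Python) =====
-- def _y_pos(vy, t):
--     """Height after t steps of a shot fired with vertical velocity vy."""
--     return vy * t - t * (t - 1) // 2
--
--
-- def _x_pos(vx, t):
--     """Horizontal position after t steps (drag freezes x after vx steps)."""
--     if vx <= t:
--         return vx * (vx + 1) // 2
--     return vx * t - t * (t - 1) // 2
--
--
-- def _least(pred, lo, hi):
--     """Least v in [lo, hi] with pred(v); pred must be monotone (never
--     True->False as v grows) and pred(hi) must hold."""
--     while lo < hi:
--         mid = (lo + hi) // 2
--         if pred(mid):
--             hi = mid
--         else:
--             lo = mid + 1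
--     return lo
--
--
-- def _x_reachable(x_lo, x_hi, t):
--     """Is there a horizontal velocity vx >= 1 whose position at time t lies
--     in [x_lo, x_hi]?  _x_pos is nondecreasing in vx, so binary-search the
--     least vx reaching x_lo and test it against x_hi."""
--     m = _least(lambda v: x_lo <= _x_pos(v, t), 1, max(x_lo, 1))
--     return x_lo <= _x_pos(m, t) <= x_hi
--
--
-- def find_max_y_v0(target_x, target_y):
--     x_lo, x_hi = target_x
--     y_lo, y_hi = target_y
--     for vy in range(-y_lo - 1, y_lo - 1, -1):
--         # An upward shot is back at launch height at t = 2*vy + 1; from t_min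
--         # on the height strictly decreases, and only those times are searched
--         # (the target lies below the launch height).
--         t_min = 2 * vy + 2 if vy > 0 else 1
--         # least t >= t_min with height <= y_hi (at t_min + max(0, -y_hi) the
--         # height is guaranteed <= y_hi)
--         t1 = _least(lambda u: _y_pos(vy, u) <= y_hi, t_min, t_min + max(0, -y_hi))
--         # the in-window times are [t1, t2]: t2 + 1 = least t >= t1 with
--         # height < y_lo (guaranteed at t1 + max(0, y_hi - y_lo + 1))
--         t2 = _least(lambda u: _y_pos(vy, u) < y_lo, t1, t1 + max(0, y_hi - y_lo + 1)) - 1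
--         for t in range(t1, t2 + 1):
--             if _x_reachable(x_lo, x_hi, t):
--                 return vy
--     raise AssertionError('Unreachable')
-- ===== Notes on version B (the rewrite author's own statement) =====
-- stated objective: alternative
-- what changed: B replaces A's generator pipeline (incremental while-scan for the first in-window time, and a ceil-seeded linear scan for the smallest x velocity) by direct binary searches for the time window and for the minimal x velocity; Pre_ excludes targets with target_x[0] < 1, where A's x-velocity search counts velocity 0 as a miss (truthiness) and accepts negative velocities, returning accidental values or raising, and the inputs where A always raises AssertionError (x_lo > x_hi, y_lo > y_hi, or y_lo > -1).
-- outside the precondition, e.g. on find_max_y_v0((-1, 1), (-10, 5)): A returns 0, B returns 9; on find_max_y_v0((-1, 0), (-2, -1)): A returns -1, B raises AssertionError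
import Mathlib
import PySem

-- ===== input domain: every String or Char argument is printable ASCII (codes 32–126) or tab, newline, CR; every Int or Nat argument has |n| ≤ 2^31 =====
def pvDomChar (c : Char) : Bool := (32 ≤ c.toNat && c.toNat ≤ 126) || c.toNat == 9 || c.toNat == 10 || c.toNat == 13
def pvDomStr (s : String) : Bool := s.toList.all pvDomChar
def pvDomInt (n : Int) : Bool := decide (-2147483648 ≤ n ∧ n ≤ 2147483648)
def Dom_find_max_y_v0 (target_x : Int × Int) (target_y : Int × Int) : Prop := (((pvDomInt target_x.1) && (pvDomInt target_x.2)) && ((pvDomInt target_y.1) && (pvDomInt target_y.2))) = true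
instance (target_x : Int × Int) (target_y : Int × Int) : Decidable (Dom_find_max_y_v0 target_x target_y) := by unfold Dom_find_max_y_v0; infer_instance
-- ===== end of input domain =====

-- B replaces A's generator pipeline (incremental while-scans for the first in-window
-- time and a ceil-seeded linear scan for the smallest x velocity) by binary searches;
-- same answers on Pre_ (proved below), similar cost overall.

-- ===== PORT A =====
-- AoC 2021 day 17: find the largest initial y velocity hitting the target box.

def calc_x (v0 t : Int) : Int :=
  let t' := min t v0
  v0 * t' - PySem.Int.floordiv (t' * (t' - 1)) 2

def calc_y (v0 t : Int) : Int :=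
  v0 * t - PySem.Int.floordiv (t * (t - 1)) 2

-- a Python `while cond: v += 1` loop; the fuel at each call site is proved (below)
-- to exceed the number of iterations the Python loop performs there
def advanceWhile (cond : Int → Bool) (v : Int) : Nat → Int
  | 0 => v
  | fuel + 1 => if cond v then advanceWhile cond (v + 1) fuel else v

-- math.ceil(target_x[0] / t): float division then ceil.  Exact as integer ceiling
-- division here: |a| ≤ 2^31 and 1 ≤ t, so a/t carries < 2^-52·|a/t| float error,
-- smaller than the 1/t gap between a non-integer quotient and the nearest integer
-- (|a/t|·2^-52 < 1/t ⟺ |a| < 2^52); exact quotients are exactly representable.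
-- (t = 0 would be ZeroDivisionError in Python; hits_x is only ever called with t ≥ 1.)
def ceilDiv (a b : Int) : Int := -(PySem.Int.floordiv (-a) b)

-- first value yielded by find_x_v0 (the caller `hits_x` only consumes one), else None
def hits_x (target_x : Int × Int) (t : Int) : Option Int :=
  let start := ceilDiv target_x.1 t
  let m := advanceWhile (fun v => decide (calc_x v t < target_x.1)) start (target_x.1.natAbs + 2)
  if calc_x m t ≤ target_x.2 then some m else none

-- Python truthiness of the Optional[int] returned by hits_x (None and 0 are falsy)
def pvTruthy : Option Int → Bool
  | some v => v != 0
  | none => false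

-- `for t in find_t(...): if hits_x(...): return ...` — find_t is a generator, so its
-- second while loop is consumed lazily by this scan; fuel again bounds the loop
def aScan (target_x : Int × Int) (y_v0 y_lo : Int) (t : Int) : Nat → Bool
  | 0 => false
  | fuel + 1 =>
    if decide (y_lo ≤ calc_y y_v0 t) then
      if pvTruthy (hits_x target_x t) then true
      else aScan target_x y_v0 y_lo (t + 1) fuel
    else false

-- body of the `for y_v0 in range(...)` loop: find_t's skip loop, then the lazy scan
def innerA (target_x target_y : Int × Int) (y_v0 : Int) : Bool :=
  let t0 : Int := if y_v0 > 0 then 2 * y_v0 + 2 else 1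
  let t1 := advanceWhile (fun u => decide (calc_y y_v0 u > target_y.2)) t0
              (2 * y_v0.natAbs + target_y.2.natAbs + 2)
  aScan target_x y_v0 target_y.1 t1 ((target_y.2 - target_y.1).toNat + 2)

def outerA (target_x target_y : Int × Int) (y_v0 : Int) : Nat → Int
  | 0 => 0  -- loop exhausted: Python raises AssertionError('Unreachable'); outside Pre_
  | fuel + 1 =>
    if innerA target_x target_y y_v0 then y_v0
    else outerA target_x target_y (y_v0 - 1) fuel

def find_max_y_v0 (target_x : Int × Int) (target_y : Int × Int) : Int :=
  outerA target_x target_y (-target_y.1 - 1) ((-target_y.1 - 1) - (target_y.1 - 1)).toNat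

-- ===== PORT B =====

def y_pos (vy t : Int) : Int := vy * t - PySem.Int.floordiv (t * (t - 1)) 2

def x_pos (vx t : Int) : Int :=
  if vx ≤ t then PySem.Int.floordiv (vx * (vx + 1)) 2
  else vx * t - PySem.Int.floordiv (t * (t - 1)) 2

-- Source B's `_least`: binary search for the least value in [lo, hi] satisfying p.
-- The while loop is ported with a fuel bound; (hi - lo).toNat iterations always
-- suffice (each step strictly shrinks hi - lo), so the port is exact.
def leastIntGo (p : Int → Bool) : Nat → Int → Int → Int
  | 0, lo, _ => lo
  | fuel + 1, lo, hi =>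
    if lo < hi then
      if p (PySem.Int.floordiv (lo + hi) 2) then
        leastIntGo p fuel lo (PySem.Int.floordiv (lo + hi) 2)
      else
        leastIntGo p fuel (PySem.Int.floordiv (lo + hi) 2 + 1) hi
    else lo

def leastInt (p : Int → Bool) (lo hi : Int) : Int := leastIntGo p (hi - lo).toNat lo hi

def x_reachable (x_lo x_hi t : Int) : Bool :=
  let m := leastInt (fun v => decide (x_lo ≤ x_pos v t)) 1 (max x_lo 1)
  decide (x_lo ≤ x_pos m t) && decide (x_pos m t ≤ x_hi)

-- Source B's `for t in range(t1, t2 + 1): if _x_reachable(...): return ...`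
def bWindowScan (x_lo x_hi : Int) (t : Int) : Nat → Bool
  | 0 => false
  | n + 1 => if x_reachable x_lo x_hi t then true else bWindowScan x_lo x_hi (t + 1) n

-- body of Source B's `for vy in range(...)` loop
def innerB (x_lo x_hi y_lo y_hi vy : Int) : Bool :=
  let t_min : Int := if vy > 0 then 2 * vy + 2 else 1
  let t1 := leastInt (fun u => decide (y_pos vy u ≤ y_hi)) t_min (t_min + max 0 (-y_hi))
  let t2 := leastInt (fun u => decide (y_pos vy u < y_lo)) t1 (t1 + max 0 (y_hi - y_lo + 1)) - 1
  bWindowScan x_lo x_hi t1 (t2 + 1 - t1).toNat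

def outerB (x_lo x_hi y_lo y_hi : Int) (vy : Int) : Nat → Int
  | 0 => 0  -- loop exhausted: Source B raises AssertionError('Unreachable'); outside Pre_
  | fuel + 1 =>
    if innerB x_lo x_hi y_lo y_hi vy then vy
    else outerB x_lo x_hi y_lo y_hi (vy - 1) fuel

def find_max_y_v0_alt (target_x : Int × Int) (target_y : Int × Int) : Int :=
  outerB target_x.1 target_x.2 target_y.1 target_y.2 (-target_y.1 - 1)
    ((-target_y.1 - 1) - (target_y.1 - 1)).toNat

-- ===== PRECONDITION & SPEC =====
-- Pre_ excludes targets with target_x[0] < 1, where A's x-velocity search counts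
-- velocity 0 as a miss (truthiness) and accepts negative velocities, returning
-- accidental values or raising, and the inputs where A always raises
-- AssertionError (x_lo > x_hi, y_lo > y_hi, or y_lo > -1).  On all of Pre_ the
-- Python A returns normally (the shot vy = y_lo, vx = x_lo hits at t = 1).
def Pre_find_max_y_v0 (target_x : Int × Int) (target_y : Int × Int) : Prop :=
  1 ≤ target_x.1 ∧ target_x.1 ≤ target_x.2 ∧ target_y.1 ≤ target_y.2 ∧ target_y.1 ≤ -1

instance (target_x : Int × Int) (target_y : Int × Int) : Decidable (Pre_find_max_y_v0 target_x target_y) := by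
  unfold Pre_find_max_y_v0; infer_instance

def pvWitness_find_max_y_v0 : (Int × Int) × (Int × Int) := ((20, 30), (-10, -5))

def Spec_find_max_y_v0 (target_x : Int × Int) (target_y : Int × Int) (out : Int) : Prop := out = find_max_y_v0_alt target_x target_y
instance (target_x : Int × Int) (target_y : Int × Int) (out : Int) : Decidable (Spec_find_max_y_v0 target_x target_y out) := by unfold Spec_find_max_y_v0; infer_instance

-- ===== CLAIM (what is proved, stated in full; the proofs are below) =====
def Claim_equal_find_max_y_v0 : Prop := ∀ (target_x : Int × Int) (target_y : Int × Int), Dom_find_max_y_v0 target_x target_y → Pre_find_max_y_v0 target_x target_y → Spec_find_max_y_v0 target_x target_y (find_max_y_v0 target_x target_y)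

-- ===== LEMMAS AND PROOFS =====

-- an even product halves exactly under Python floor division
lemma pvTwoFdiv {a : Int} (h : Even a) : 2 * PySem.Int.floordiv a 2 = a := by
  obtain ⟨r, rfl⟩ := h
  rw [PySem.Int.floordiv_eq_ediv_of_pos (by norm_num)]
  omega

lemma two_mul_calc_y (v t : Int) : 2 * calc_y v t = t * (2 * v - t + 1) := by
  have he : Even (t * (t - 1)) := by
    have h := Int.even_mul_succ_self (t - 1)
    have e : (t - 1) * (t - 1 + 1) = t * (t - 1) := by ring
    rwa [e] at h
  have h2 := pvTwoFdiv he
  dsimp only [calc_y]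
  linear_combination (-1 : Int) * h2

lemma two_mul_calc_x (v t : Int) :
    2 * calc_x v t = (min t v) * (2 * v - (min t v) + 1) := by
  have he : Even ((min t v) * ((min t v) - 1)) := by
    have h := Int.even_mul_succ_self ((min t v) - 1)
    have e : ((min t v) - 1) * ((min t v) - 1 + 1) = (min t v) * ((min t v) - 1) := by ring
    rwa [e] at h
  have h2 := pvTwoFdiv he
  dsimp only [calc_x]
  linear_combination (-1 : Int) * h2

lemma x_pos_eq_calc_x (v t : Int) : x_pos v t = calc_x v t := by
  by_cases h : v ≤ t
  · have hx2 := two_mul_calc_x v t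
    rw [min_eq_right h] at hx2
    have h2 := pvTwoFdiv (Int.even_mul_succ_self v)
    dsimp only [x_pos]
    rw [if_pos h]
    have key : 2 * PySem.Int.floordiv (v * (v + 1)) 2 = 2 * calc_x v t := by
      linear_combination h2 - hx2
    omega
  · have hm : min t v = t := min_eq_left (by omega)
    dsimp only [x_pos, calc_x]
    rw [if_neg h, hm]

lemma y_pos_eq_calc_y (v t : Int) : y_pos v t = calc_y v t := rfl

lemma calc_y_succ (v t : Int) : calc_y v (t + 1) = calc_y v t + (v - t) := by
  have h1 := two_mul_calc_y v (t + 1)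
  have h2 := two_mul_calc_y v t
  have key : 2 * calc_y v (t + 1) = 2 * (calc_y v t + (v - t)) := by
    linear_combination h1 - h2
  omega

lemma calc_y_drop (v u : Int) (hu : v + 1 ≤ u) :
    ∀ k : Nat, calc_y v (u + k) ≤ calc_y v u - k := by
  intro k
  induction k with
  | zero => simp
  | succ k ih =>
      have e : u + ((k + 1 : Nat) : Int) = (u + (k : Nat)) + 1 := by push_cast; ring
      rw [e, calc_y_succ]
      omega

lemma calc_y_anti (v u s : Int) (hu : v + 1 ≤ u) (hus : u ≤ s) :
    calc_y v s ≤ calc_y v u := by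
  have hk := calc_y_drop v u hu (s - u).toNat
  have e : u + (((s - u).toNat : Nat) : Int) = s := by omega
  rw [e] at hk
  omega

lemma calc_y_tmin_nonpos (vy : Int) :
    calc_y vy (if vy > 0 then 2 * vy + 2 else 1) ≤ 0 := by
  split_ifs with h
  · have h2 : 2 * calc_y vy (2 * vy + 2) = -(2 * vy + 2) := by
      have h0 := two_mul_calc_y vy (2 * vy + 2)
      linear_combination h0
    omega
  · have h2 : 2 * calc_y vy 1 = 2 * vy := by
      have h0 := two_mul_calc_y vy 1
      linear_combination h0
    omega

lemma calc_x_ge_self (v t : Int) (hv : 1 ≤ v) (ht : 1 ≤ t) : v ≤ calc_x v t := by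
  have h2 := two_mul_calc_x v t
  have hp : 0 ≤ (min t v - 1) * (2 * v - min t v) := mul_nonneg (by omega) (by omega)
  have key : 2 * calc_x v t - 2 * v = (min t v - 1) * (2 * v - min t v) := by
    linear_combination h2
  omega

lemma calc_x_le_mul (v t : Int) (hv : 1 ≤ v) (ht : 1 ≤ t) : calc_x v t ≤ v * t := by
  have h2 := two_mul_calc_x v t
  have hp1 : 0 ≤ 2 * v * (t - min t v) := mul_nonneg (by omega) (by omega)
  have hp2 : 0 ≤ (min t v) * (min t v - 1) := mul_nonneg (by omega) (by omega)
  have key : 2 * (v * t) - 2 * calc_x v t = 2 * v * (t - min t v) + (min t v) * (min t v - 1) := by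
    linear_combination (-1 : Int) * h2
  omega

lemma calc_x_mono (u v t : Int) (hu : 1 ≤ u) (huv : u ≤ v) (ht : 1 ≤ t) :
    calc_x u t ≤ calc_x v t := by
  have hA := two_mul_calc_x u t
  have hB := two_mul_calc_x v t
  have p1 : 0 ≤ (min t u + min t v) * (v - u) := mul_nonneg (by omega) (by omega)
  have p2 : 0 ≤ (min t v - min t u) * (v + u - min t u - min t v) :=
    mul_nonneg (by omega) (by omega)
  have key : 2 * calc_x v t - 2 * calc_x u t =
      (min t u + min t v) * (v - u) + (min t v - min t u) * (v + u - min t u - min t v) +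
        (min t v - min t u) := by
    linear_combination hB - hA
  omega

lemma ceilDiv_pos (a b : Int) (ha : 1 ≤ a) (hb : 1 ≤ b) : 1 ≤ ceilDiv a b := by
  dsimp only [ceilDiv]
  have h : ¬ ((0 : Int) ≤ PySem.Int.floordiv (-a) b) := by
    rw [PySem.Int.le_floordiv_iff_mul_le (by omega : (0 : Int) < b)]
    rw [zero_mul]
    omega
  omega

lemma ceilDiv_le (a b v : Int) (hb : 1 ≤ b) (h : a ≤ v * b) : ceilDiv a b ≤ v := by
  dsimp only [ceilDiv]
  have hle : -v ≤ PySem.Int.floordiv (-a) b := by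
    rw [PySem.Int.le_floordiv_iff_mul_le (by omega : (0 : Int) < b)]
    have e : (-v) * b = -(v * b) := by ring
    rw [e]
    omega
  omega

lemma advanceWhile_spec (cond : Int → Bool) :
    ∀ (fuel : Nat) (v : Int), (∃ j : Nat, j < fuel ∧ cond (v + j) = false) →
      v ≤ advanceWhile cond v fuel ∧ cond (advanceWhile cond v fuel) = false ∧
        ∀ u, v ≤ u → u < advanceWhile cond v fuel → cond u = true := by
  intro fuel
  induction fuel with
  | zero =>
      intro v h
      obtain ⟨j, hj, _⟩ := h
      exact absurd hj (Nat.not_lt_zero j)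
  | succ f ih =>
      intro v h
      obtain ⟨j, hj, hcf⟩ := h
      by_cases hc : cond v = true
      · have hj0 : j ≠ 0 := by
          intro h0
          rw [h0] at hcf
          have e : v + ((0 : Nat) : Int) = v := by simp
          rw [e] at hcf
          rw [hc] at hcf
          simp at hcf
        obtain ⟨j', rfl⟩ : ∃ j', j = j' + 1 := ⟨j - 1, by omega⟩
        have hidx : v + ((j' + 1 : Nat) : Int) = v + 1 + (j' : Int) := by push_cast; ring
        rw [hidx] at hcf
        have hrec := ih (v + 1) ⟨j', by omega, hcf⟩
        have heq : advanceWhile cond v (f + 1) = advanceWhile cond (v + 1) f := by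
          simp [advanceWhile, hc]
        rw [heq]
        refine ⟨by omega, hrec.2.1, ?_⟩
        intro u hu1 hu2
        rcases eq_or_lt_of_le hu1 with h | h
        · rw [← h]; exact hc
        · exact hrec.2.2 u (by omega) hu2
      · have heq : advanceWhile cond v (f + 1) = v := by
          simp only [advanceWhile]
          rw [if_neg hc]
        rw [heq]
        refine ⟨le_refl v, by simpa using hc, ?_⟩
        intro u h1 h2
        omega

lemma pvMid_ge (lo hi : Int) (h : lo < hi) : lo ≤ PySem.Int.floordiv (lo + hi) 2 :=
  (PySem.Int.floordiv_two_mid_bounds (le_of_lt h)).1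

lemma pvMid_lt (lo hi : Int) (h : lo < hi) : PySem.Int.floordiv (lo + hi) 2 < hi := by
  rw [PySem.Int.floordiv_lt_iff_lt_mul (by norm_num)]
  omega

lemma leastInt_spec_aux (p : Int → Bool) :
    ∀ (n : Nat), ∀ (lo hi : Int), (hi - lo).toNat ≤ n → lo ≤ hi → p hi = true →
      (∀ u v', lo ≤ u → u ≤ v' → p u = true → p v' = true) →
      lo ≤ leastIntGo p n lo hi ∧ leastIntGo p n lo hi ≤ hi ∧
        ∀ s, lo ≤ s → (p s = true ↔ leastIntGo p n lo hi ≤ s) := by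
  intro n
  induction n with
  | zero =>
      intro lo hi hn hlohi hphi hmono
      have hloeq : lo = hi := by omega
      have heq : leastIntGo p 0 lo hi = lo := rfl
      rw [heq]
      refine ⟨le_refl lo, by omega, ?_⟩
      intro s hs
      constructor
      · intro _; exact hs
      · intro _
        exact hmono hi s (by omega) (by omega) hphi
  | succ n ih =>
      intro lo hi hn hlohi hphi hmono
      by_cases h : lo < hi
      · have hm1 := pvMid_ge lo hi h
        have hm2 := pvMid_lt lo hi h
        by_cases hp : p (PySem.Int.floordiv (lo + hi) 2) = true
        · have heq : leastIntGo p (n + 1) lo hi =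
              leastIntGo p n lo (PySem.Int.floordiv (lo + hi) 2) := by
            simp only [leastIntGo]
            rw [if_pos h, if_pos hp]
          obtain ⟨c1, c2, c3⟩ :=
            ih lo (PySem.Int.floordiv (lo + hi) 2) (by omega) hm1 hp hmono
          rw [heq]
          exact ⟨c1, by omega, c3⟩
        · have heq : leastIntGo p (n + 1) lo hi =
              leastIntGo p n (PySem.Int.floordiv (lo + hi) 2 + 1) hi := by
            simp only [leastIntGo]
            rw [if_pos h, if_neg hp]
          have hmono' : ∀ u v', PySem.Int.floordiv (lo + hi) 2 + 1 ≤ u → u ≤ v' →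
              p u = true → p v' = true :=
            fun u v' hu huv hpu => hmono u v' (by omega) huv hpu
          obtain ⟨c1, c2, c3⟩ :=
            ih (PySem.Int.floordiv (lo + hi) 2 + 1) hi (by omega) (by omega) hphi hmono'
          rw [heq]
          refine ⟨by omega, c2, ?_⟩
          intro s hs
          by_cases hsm : PySem.Int.floordiv (lo + hi) 2 + 1 ≤ s
          · exact c3 s hsm
          · constructor
            · intro hps
              have hpm : p (PySem.Int.floordiv (lo + hi) 2) = true :=
                hmono s (PySem.Int.floordiv (lo + hi) 2) hs (by omega) hps
              exact absurd hpm hp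
            · intro hls
              omega
      · have hloeq : lo = hi := by omega
        have heq : leastIntGo p (n + 1) lo hi = lo := by
          simp only [leastIntGo]
          rw [if_neg h]
        rw [heq]
        refine ⟨le_refl lo, by omega, ?_⟩
        intro s hs
        constructor
        · intro _; exact hs
        · intro _
          exact hmono hi s (by omega) (by omega) hphi

lemma leastInt_spec (p : Int → Bool) :
    ∀ (lo hi : Int), lo ≤ hi → p hi = true →
      (∀ u v', lo ≤ u → u ≤ v' → p u = true → p v' = true) →
      lo ≤ leastInt p lo hi ∧ leastInt p lo hi ≤ hi ∧
        ∀ s, lo ≤ s → (p s = true ↔ leastInt p lo hi ≤ s) :=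
  fun lo hi => leastInt_spec_aux p (hi - lo).toNat lo hi (le_refl _)

lemma aScan_spec (tx : Int × Int) (vy ylo : Int) :
    ∀ (fuel : Nat) (t : Int),
      (∀ u s, t ≤ u → u ≤ s → calc_y vy s ≤ calc_y vy u) →
      (∃ j : Nat, j < fuel ∧ calc_y vy (t + j) < ylo) →
      (aScan tx vy ylo t fuel = true ↔
        ∃ s, t ≤ s ∧ ylo ≤ calc_y vy s ∧ pvTruthy (hits_x tx s) = true) := by
  intro fuel
  induction fuel with
  | zero =>
      intro t hanti hstop
      obtain ⟨j, hj, _⟩ := hstop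
      exact absurd hj (Nat.not_lt_zero j)
  | succ f ih =>
      intro t hanti hstop
      obtain ⟨j, hj, hcy⟩ := hstop
      by_cases hy : ylo ≤ calc_y vy t
      · by_cases htr : pvTruthy (hits_x tx t) = true
        · have heq : aScan tx vy ylo t (f + 1) = true := by
            simp [aScan, hy, htr]
          rw [heq]
          exact iff_of_true rfl ⟨t, le_refl t, hy, htr⟩
        · have heq : aScan tx vy ylo t (f + 1) = aScan tx vy ylo (t + 1) f := by
            simp [aScan, hy, htr]
          have hj0 : j ≠ 0 := by
            intro h0
            rw [h0] at hcy
            have e : t + ((0 : Nat) : Int) = t := by simp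
            rw [e] at hcy
            omega
          obtain ⟨j', rfl⟩ : ∃ j', j = j' + 1 := ⟨j - 1, by omega⟩
          have hidx : t + ((j' + 1 : Nat) : Int) = t + 1 + (j' : Int) := by push_cast; ring
          rw [hidx] at hcy
          have hanti' : ∀ u s, t + 1 ≤ u → u ≤ s → calc_y vy s ≤ calc_y vy u :=
            fun u s hu hus => hanti u s (by omega) hus
          rw [heq, ih (t + 1) hanti' ⟨j', by omega, hcy⟩]
          constructor
          · rintro ⟨s, hs1, hs2, hs3⟩
            exact ⟨s, by omega, hs2, hs3⟩
          · rintro ⟨s, hs1, hs2, hs3⟩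
            rcases eq_or_lt_of_le hs1 with h | h
            · rw [← h] at hs3; exact absurd hs3 htr
            · exact ⟨s, by omega, hs2, hs3⟩
      · have heq : aScan tx vy ylo t (f + 1) = false := by
          simp [aScan, hy]
        rw [heq]
        apply iff_of_false (by simp)
        rintro ⟨s, hs1, hs2, _⟩
        have := hanti t s (le_refl t) hs1
        omega

lemma bWindowScan_spec (x_lo x_hi : Int) :
    ∀ (n : Nat) (t : Int),
      (bWindowScan x_lo x_hi t n = true ↔
        ∃ s, t ≤ s ∧ s < t + n ∧ x_reachable x_lo x_hi s = true) := by
  intro n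
  induction n with
  | zero =>
      intro t
      simp only [bWindowScan]
      apply iff_of_false (by simp)
      rintro ⟨s, hs1, hs2, _⟩
      push_cast at hs2
      omega
  | succ n ih =>
      intro t
      by_cases hr : x_reachable x_lo x_hi t = true
      · have heq : bWindowScan x_lo x_hi t (n + 1) = true := by
          simp [bWindowScan, hr]
        rw [heq]
        exact iff_of_true rfl ⟨t, le_refl t, by push_cast; omega, hr⟩
      · have heq : bWindowScan x_lo x_hi t (n + 1) = bWindowScan x_lo x_hi (t + 1) n := by
          simp [bWindowScan, hr]
        rw [heq, ih (t + 1)]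
        constructor
        · rintro ⟨s, hs1, hs2, hs3⟩
          refine ⟨s, by omega, by push_cast at hs2 ⊢; omega, hs3⟩
        · rintro ⟨s, hs1, hs2, hs3⟩
          rcases eq_or_lt_of_le hs1 with h | h
          · rw [← h] at hs3; exact absurd hs3 hr
          · refine ⟨s, by omega, by push_cast at hs2 ⊢; omega, hs3⟩

lemma pvBoolEq (a b : Bool) (h : a = true ↔ b = true) : a = b := by
  cases a <;> cases b <;> simp_all

lemma truthy_eq_reach (x_lo x_hi t : Int) (hx : 1 ≤ x_lo) (ht : 1 ≤ t) :
    pvTruthy (hits_x (x_lo, x_hi) t) = x_reachable x_lo x_hi t := by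
  dsimp only [hits_x, x_reachable]
  set condA := (fun v => decide (calc_x v t < x_lo)) with hcond
  set pB := (fun v => decide (x_lo ≤ x_pos v t)) with hpB
  have hc0pos : 1 ≤ ceilDiv x_lo t := ceilDiv_pos x_lo t hx ht
  have hstop : ∃ j : Nat, j < x_lo.natAbs + 2 ∧ condA (ceilDiv x_lo t + j) = false := by
    refine ⟨(x_lo - ceilDiv x_lo t).toNat, by omega, ?_⟩
    have hge : x_lo ≤ calc_x (ceilDiv x_lo t + ((x_lo - ceilDiv x_lo t).toNat : Int)) t := by
      by_cases hcx : ceilDiv x_lo t ≤ x_lo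
      · have e : ceilDiv x_lo t + ((x_lo - ceilDiv x_lo t).toNat : Int) = x_lo := by omega
        rw [e]
        exact calc_x_ge_self x_lo t (by omega) ht
      · have e : ceilDiv x_lo t + ((x_lo - ceilDiv x_lo t).toNat : Int) = ceilDiv x_lo t := by omega
        rw [e]
        have := calc_x_ge_self (ceilDiv x_lo t) t hc0pos ht
        omega
    simp only [hcond, decide_eq_false_iff_not, not_lt]
    omega
  obtain ⟨hA1, hA2, hA3⟩ := advanceWhile_spec condA (x_lo.natAbs + 2) (ceilDiv x_lo t) hstop
  set mA := advanceWhile condA (ceilDiv x_lo t) (x_lo.natAbs + 2) with hmA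
  have hmAge : x_lo ≤ calc_x mA t := by
    have h := hA2
    simp only [hcond, decide_eq_false_iff_not, not_lt] at h
    exact h
  have hmApos : 1 ≤ mA := le_trans hc0pos hA1
  have hhiB : pB (max x_lo 1) = true := by
    simp only [hpB, decide_eq_true_eq, x_pos_eq_calc_x]
    have := calc_x_ge_self (max x_lo 1) t (le_max_right _ _) ht
    omega
  have hmono : ∀ u v', 1 ≤ u → u ≤ v' → pB u = true → pB v' = true := by
    intro u v' hu huv hpu
    simp only [hpB, decide_eq_true_eq, x_pos_eq_calc_x] at hpu ⊢
    exact le_trans hpu (calc_x_mono u v' t hu huv ht)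
  obtain ⟨hB1, hB2, hB3⟩ := leastInt_spec pB 1 (max x_lo 1) (by omega) hhiB hmono
  set mB := leastInt pB 1 (max x_lo 1) with hmB
  have hpmB : x_lo ≤ calc_x mB t := by
    have h := (hB3 mB hB1).mpr (le_refl mB)
    simp only [hpB, decide_eq_true_eq, x_pos_eq_calc_x] at h
    exact h
  have hBA : mB ≤ mA :=
    (hB3 mA hmApos).mp (by simp only [hpB, decide_eq_true_eq, x_pos_eq_calc_x]; exact hmAge)
  have hAB : mA ≤ mB := by
    by_contra hlt
    have hlt2 : mB < mA := by omega
    have hc0mB : ceilDiv x_lo t ≤ mB := by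
      apply ceilDiv_le x_lo t mB ht
      have h2 := calc_x_le_mul mB t hB1 ht
      omega
    have h := hA3 mB hc0mB hlt2
    simp only [hcond, decide_eq_true_eq] at h
    omega
  have hm : mA = mB := le_antisymm hAB hBA
  by_cases hhi : calc_x mA t ≤ x_hi
  · rw [if_pos hhi]
    have h1 : pvTruthy (some mA) = true := by
      simp [pvTruthy]
      omega
    rw [h1]
    have h2 : pB mB = true := (hB3 mB hB1).mpr (le_refl mB)
    simp only [hpB, decide_eq_true_eq] at h2
    rw [x_pos_eq_calc_x] at h2
    simp only [x_pos_eq_calc_x]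
    rw [← hm]
    simp [hmAge, hhi]
  · rw [if_neg hhi]
    have h1 : pvTruthy none = false := rfl
    rw [h1]
    simp only [x_pos_eq_calc_x]
    rw [← hm]
    simp [hhi]

lemma inner_eq (tx ty : Int × Int) (hx : 1 ≤ tx.1) (vy : Int) :
    innerA tx ty vy = innerB tx.1 tx.2 ty.1 ty.2 vy := by
  obtain ⟨xlo, xhi⟩ := tx
  obtain ⟨ylo, yhi⟩ := ty
  dsimp only at hx
  dsimp only [innerA, innerB]
  set t0 : Int := if vy > 0 then 2 * vy + 2 else 1 with ht0
  have ht0vy : vy + 1 ≤ t0 := by rw [ht0]; split_ifs <;> omega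
  have ht0pos : 1 ≤ t0 := by rw [ht0]; split_ifs <;> omega
  have hcy0 : calc_y vy t0 ≤ 0 := by rw [ht0]; exact calc_y_tmin_nonpos vy
  have hanti : ∀ u s, t0 ≤ u → u ≤ s → calc_y vy s ≤ calc_y vy u :=
    fun u s hu hus => calc_y_anti vy u s (by omega) hus
  -- A's skip loop and B's first binary search find the same t1
  have hstopA : ∃ j : Nat, j < 2 * vy.natAbs + yhi.natAbs + 2 ∧
      (fun u => decide (calc_y vy u > yhi)) (t0 + j) = false := by
    refine ⟨yhi.natAbs, by omega, ?_⟩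
    have hdrop := calc_y_drop vy t0 (by omega) yhi.natAbs
    simp only [decide_eq_false_iff_not, not_lt]
    omega
  obtain ⟨hA1, hA2, hA3⟩ :=
    advanceWhile_spec (fun u => decide (calc_y vy u > yhi)) (2 * vy.natAbs + yhi.natAbs + 2) t0 hstopA
  set t1A := advanceWhile (fun u => decide (calc_y vy u > yhi)) t0 (2 * vy.natAbs + yhi.natAbs + 2) with ht1A
  have ht1Ahi : calc_y vy t1A ≤ yhi := by
    have h := hA2
    simp only [decide_eq_false_iff_not, not_lt] at h
    exact h
  have hphi1 : (fun u => decide (y_pos vy u ≤ yhi)) (t0 + max 0 (-yhi)) = true := by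
    have hdrop := calc_y_drop vy t0 (by omega) ((max 0 (-yhi)).toNat)
    have e : t0 + (((max 0 (-yhi)).toNat : Nat) : Int) = t0 + max 0 (-yhi) := by omega
    rw [e] at hdrop
    simp only [y_pos_eq_calc_y, decide_eq_true_eq]
    omega
  have hmono1 : ∀ u v', t0 ≤ u → u ≤ v' →
      (fun u => decide (y_pos vy u ≤ yhi)) u = true →
      (fun u => decide (y_pos vy u ≤ yhi)) v' = true := by
    intro u v' hu huv hpu
    simp only [y_pos_eq_calc_y, decide_eq_true_eq] at hpu ⊢
    exact le_trans (hanti u v' hu huv) hpu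
  obtain ⟨hB1a, hB1b, hB1c⟩ :=
    leastInt_spec (fun u => decide (y_pos vy u ≤ yhi)) t0 (t0 + max 0 (-yhi)) (by omega) hphi1 hmono1
  set t1B := leastInt (fun u => decide (y_pos vy u ≤ yhi)) t0 (t0 + max 0 (-yhi)) with ht1B
  have hcyt1B : calc_y vy t1B ≤ yhi := by
    have h := (hB1c t1B hB1a).mpr (le_refl t1B)
    simp only [y_pos_eq_calc_y, decide_eq_true_eq] at h
    exact h
  have ht1AB : t1A = t1B := by
    have h1 : t1B ≤ t1A :=
      (hB1c t1A hA1).mp (by simp only [y_pos_eq_calc_y, decide_eq_true_eq]; exact ht1Ahi)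
    have h2 : t1A ≤ t1B := by
      by_contra hlt
      have hlt2 : t1B < t1A := by omega
      have h := hA3 t1B hB1a hlt2
      simp only [decide_eq_true_eq] at h
      omega
    omega
  -- B's second binary search bounds the window
  have hphi2 : (fun u => decide (y_pos vy u < ylo)) (t1B + max 0 (yhi - ylo + 1)) = true := by
    have hdrop := calc_y_drop vy t1B (by omega) ((max 0 (yhi - ylo + 1)).toNat)
    have e : t1B + (((max 0 (yhi - ylo + 1)).toNat : Nat) : Int) = t1B + max 0 (yhi - ylo + 1) := by omega
    rw [e] at hdrop
    simp only [y_pos_eq_calc_y, decide_eq_true_eq]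
    omega
  have hmono2 : ∀ u v', t1B ≤ u → u ≤ v' →
      (fun u => decide (y_pos vy u < ylo)) u = true →
      (fun u => decide (y_pos vy u < ylo)) v' = true := by
    intro u v' hu huv hpu
    simp only [y_pos_eq_calc_y, decide_eq_true_eq] at hpu ⊢
    have := hanti u v' (by omega) huv
    omega
  obtain ⟨hB2a, hB2b, hB2c⟩ :=
    leastInt_spec (fun u => decide (y_pos vy u < ylo)) t1B (t1B + max 0 (yhi - ylo + 1)) (by omega) hphi2 hmono2
  set tStop := leastInt (fun u => decide (y_pos vy u < ylo)) t1B (t1B + max 0 (yhi - ylo + 1)) with htStop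
  -- the lazy scan on A's side
  have hantiS : ∀ u s, t1A ≤ u → u ≤ s → calc_y vy s ≤ calc_y vy u :=
    fun u s hu hus => hanti u s (by omega) hus
  have hstopS : ∃ j : Nat, j < (yhi - ylo).toNat + 2 ∧ calc_y vy (t1A + j) < ylo := by
    refine ⟨(yhi - ylo).toNat + 1, by omega, ?_⟩
    have hdrop := calc_y_drop vy t1A (by omega) ((yhi - ylo).toNat + 1)
    omega
  have HA := aScan_spec (xlo, xhi) vy ylo ((yhi - ylo).toNat + 2) t1A hantiS hstopS
  have HB := bWindowScan_spec xlo xhi (tStop - 1 + 1 - t1B).toNat t1B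
  apply pvBoolEq
  rw [HA, HB]
  have hcast : t1B + (((tStop - 1 + 1 - t1B).toNat : Nat) : Int) = tStop := by omega
  constructor
  · rintro ⟨s, hs1, hs2, hs3⟩
    have hsStop : s < tStop := by
      by_contra hge
      have hge2 : tStop ≤ s := by omega
      have h := (hB2c s (by omega)).mpr hge2
      simp only [y_pos_eq_calc_y, decide_eq_true_eq] at h
      omega
    refine ⟨s, by omega, by omega, ?_⟩
    rw [← truthy_eq_reach xlo xhi s hx (by omega)]
    exact hs3
  · rintro ⟨s, hs1, hs2, hs3⟩
    have hsStop : s < tStop := by omega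
    have hcys : ylo ≤ calc_y vy s := by
      by_contra hlt
      have hlt2 : y_pos vy s < ylo := by simp only [y_pos_eq_calc_y]; omega
      have h := (hB2c s hs1).mp
        (by simp only [decide_eq_true_eq]; exact hlt2)
      omega
    refine ⟨s, by omega, hcys, ?_⟩
    rw [truthy_eq_reach xlo xhi s hx (by omega)]
    exact hs3

lemma outer_eq (tx ty : Int × Int) (hx : 1 ≤ tx.1) :
    ∀ (fuel : Nat) (vy : Int),
      outerA tx ty vy fuel = outerB tx.1 tx.2 ty.1 ty.2 vy fuel := by
  intro fuel
  induction fuel with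
  | zero => intro vy; simp [outerA, outerB]
  | succ f ih =>
      intro vy
      simp only [outerA, outerB, inner_eq tx ty hx vy, ih]

-- ===== VERDICT (by name: the statement is the Claim_ definition above) =====
theorem find_max_y_v0_spec : Claim_equal_find_max_y_v0 := by
  intro tx ty _hdom hpre
  unfold Spec_find_max_y_v0 find_max_y_v0 find_max_y_v0_alt
  exact outer_eq tx ty hpre.1 _ _
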